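-- pv_equiv track=rewrite | github.com/HaydenMcCabe/Advent-of-Code-2023 | Day 13/part_2.py | single_bit_pos
-- ===== SOURCE A (Python) =====
-- def single_bit_pos(v: int) -> any:
--     one_bit_mask = 1
--     shifts = 0
--     while one_bit_mask <= v:
--         if one_bit_mask == v:
--             return shifts
--         one_bit_mask = one_bit_mask << 1
--         shifts += 1
--     return None
-- ===== SOURCE B (Python) =====
-- def single_bit_pos(v: int) -> any:
--     if v > 0 and v & (v - 1) == 0:
--         return v.bit_length() - 1
--     return None
-- ===== Notes on version B (the rewrite author's own statement) =====
-- stated objective: idiomatic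
-- what changed: Replaced the shift-and-compare loop with the closed-form bit trick (and of v with its predecessor vanishes iff v is a power of two) and bit_length to read off the exponent; no loop at all.
import Mathlib
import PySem

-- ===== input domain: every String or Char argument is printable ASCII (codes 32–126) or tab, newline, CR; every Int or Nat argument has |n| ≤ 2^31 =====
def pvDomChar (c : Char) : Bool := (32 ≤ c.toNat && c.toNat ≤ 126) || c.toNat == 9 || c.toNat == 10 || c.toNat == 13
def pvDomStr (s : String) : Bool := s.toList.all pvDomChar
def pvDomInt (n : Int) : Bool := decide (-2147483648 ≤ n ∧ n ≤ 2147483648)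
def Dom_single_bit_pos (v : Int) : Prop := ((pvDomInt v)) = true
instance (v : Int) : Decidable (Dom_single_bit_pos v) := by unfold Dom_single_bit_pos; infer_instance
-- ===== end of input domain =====

-- B replaces A's shift loop by the closed-form test v & (v-1) == 0 plus bit_length (idiomatic, loop-free).

-- ===== PORT A =====
-- A's while loop; the mask is a Nat with the invariant 0 < mask carried as a hypothesis
-- (the loop starts at 1 and only doubles), used solely for termination.
def sbpLoop (v : Int) (mask : Nat) (hm : 0 < mask) (shifts : Int) : Option Int :=
  if (mask : Int) ≤ v then
    if (mask : Int) = v then some shifts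
    else sbpLoop v (mask <<< 1) (by simp [Nat.shiftLeft_eq]; omega) (shifts + 1)
  else none
  termination_by v.toNat + 1 - mask
  decreasing_by
    rename_i h _
    have : mask ≤ v.toNat := by omega
    simp [Nat.shiftLeft_eq]; omega

def single_bit_pos (v : Int) : Option Int :=
  sbpLoop v 1 one_pos 0

-- ===== PORT B =====
-- bit_length() of a positive int is Nat.size of its magnitude; `v & (v-1)` is Int.land.
def single_bit_pos_alt (v : Int) : Option Int :=
  if 0 < v ∧ Int.land v (v - 1) = 0 then some ((v.toNat.size : Int) - 1)
  else none

-- ===== PRECONDITION & SPEC =====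
def Spec_single_bit_pos (v : Int) (out : Option Int) : Prop := out = single_bit_pos_alt v
instance (v : Int) (out : Option Int) : Decidable (Spec_single_bit_pos v out) := by unfold Spec_single_bit_pos; infer_instance

-- ===== CLAIM (what is proved, stated in full; the proofs are below) =====
def Claim_equal_single_bit_pos : Prop := ∀ (v : Int), Dom_single_bit_pos v → Spec_single_bit_pos v (single_bit_pos v)

-- ===== LEMMAS AND PROOFS =====

-- `n & (n-1) == 0` characterises powers of two (for n ≥ 1).
theorem land_pred_eq_zero_iff (n : Nat) (hn : 1 ≤ n) :
    (n &&& (n - 1) = 0) ↔ n = 2 ^ n.log2 := by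
  induction n using Nat.strong_induction_on with
  | _ n IH =>
    rcases Nat.even_or_odd n with ⟨m, hm⟩ | ⟨m, hm⟩
    · -- n = 2 * m, m ≥ 1
      have hm' : 1 ≤ m := by omega
      have hbit : n &&& (n - 1) = 2 * (m &&& (m - 1)) := by
        have h := Nat.land_bit false m true (m - 1)
        simp [Nat.bit_true] at h
        have e1 : n = 2 * m := by omega
        have e2 : n - 1 = 2 * (m - 1) + 1 := by omega
        rw [e2, e1, h]
      have hlog : n.log2 = m.log2 + 1 := by
        rw [Nat.log2_def]
        have : 2 ≤ n := by omega
        simp [this]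
        congr 1
        omega
      have IHm := IH m (by omega) hm'
      rw [hbit, hlog]
      constructor
      · intro h
        have : m &&& (m - 1) = 0 := by omega
        have := IHm.mp this
        rw [pow_succ]
        omega
      · intro h
        rw [pow_succ] at h
        have : m = 2 ^ m.log2 := by omega
        have := IHm.mpr this
        omega
    · -- n = 2 * m + 1
      rcases Nat.eq_zero_or_pos m with h0 | hm'
    -- n = 1
      · subst h0
        subst hm
        decide
      · -- odd n ≥ 3: both sides false
        have hbit : n &&& (n - 1) = 2 * m := by
          have h := Nat.land_bit true m false m
          simp [Nat.bit_true, Nat.and_self] at h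
          have e1 : n = 2 * m + 1 := by omega
          have e2 : n - 1 = 2 * m := by omega
          rw [e2, e1, h]
        constructor
        · intro h; omega
        · intro h
          exfalso
          rcases Nat.eq_zero_or_pos n.log2 with hl | hl
          · rw [hl] at h; simp at h; omega
          · have : 2 ^ n.log2 = 2 * 2 ^ (n.log2 - 1) := by
              conv_lhs => rw [show n.log2 = (n.log2 - 1) + 1 by omega]
              rw [pow_succ]; ring
            omega

-- A's loop at mask = 2^k, shifts = k, computed in closed form.
theorem sbpLoop_eq (v : Int) (mask : Nat) (hm : 0 < mask) (shifts : Int) :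
    ∀ k : Nat, mask = 2 ^ k → shifts = (k : Int) →
    sbpLoop v mask hm shifts =
      if 0 < v ∧ v.toNat = 2 ^ v.toNat.log2 ∧ k ≤ v.toNat.log2
      then some ((v.toNat.log2 : Nat) : Int) else none := by
  induction mask, hm, shifts using sbpLoop.induct (v := v) with
  | case1 mask hm shifts hle heq =>
    intro k hk hs
    -- mask = v: found the bit
    have hv : 0 < v := by omega
    have hvn : v.toNat = 2 ^ k := by omega
    have hlog : v.toNat.log2 = k := by rw [hvn]; exact Nat.log2_two_pow
    rw [sbpLoop, if_pos hle, if_pos heq,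
        if_pos ⟨hv, by rw [hlog]; exact hvn, by omega⟩, hlog, hs]
  | case2 mask hm shifts hle hne IH =>
    intro k hk hs
    rw [sbpLoop, if_pos hle, if_neg hne]
    rw [IH (k + 1) (by simp [Nat.shiftLeft_eq]; omega) (by omega)]
    have hcond : (0 < v ∧ v.toNat = 2 ^ v.toNat.log2 ∧ k + 1 ≤ v.toNat.log2) ↔
        (0 < v ∧ v.toNat = 2 ^ v.toNat.log2 ∧ k ≤ v.toNat.log2) := by
      constructor
      · rintro ⟨h1, h2, h3⟩; exact ⟨h1, h2, by omega⟩
      · rintro ⟨h1, h2, h3⟩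
        refine ⟨h1, h2, ?_⟩
        rcases Nat.lt_or_ge k v.toNat.log2 with h | h
        · omega
        · exfalso
          have hkl : k = v.toNat.log2 := by omega
          have : v.toNat = 2 ^ k := by rw [h2, hkl]
          apply hne
          subst hk
          omega
    rw [if_congr hcond rfl rfl]
  | case3 mask hm shifts hle =>
    intro k hk hs
    rw [sbpLoop, if_neg hle]
    split
    · rename_i hc
      exfalso
      obtain ⟨h1, h2, h3⟩ := hc
      have : (2:Nat) ^ k ≤ 2 ^ v.toNat.log2 := Nat.pow_le_pow_right (by omega) h3
      have : (2:Nat) ^ k ≤ v.toNat := by omega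
      subst hk
      omega
    · rfl

-- the Int bitwise-and of nonnegative values is the Nat one
theorem land_natCast (m n : Nat) : Int.land (m : Int) (n : Int) = ((m &&& n : Nat) : Int) := rfl

-- ===== VERDICT (by name: the statement is the Claim_ definition above) =====
theorem single_bit_pos_spec : Claim_equal_single_bit_pos := by
  intro v _
  unfold Spec_single_bit_pos single_bit_pos single_bit_pos_alt
  rw [sbpLoop_eq v 1 one_pos 0 0 (by norm_num) rfl]
  rcases le_or_gt v 0 with hv | hv
  · have h1 : ¬ (0 < v ∧ v.toNat = 2 ^ v.toNat.log2 ∧ 0 ≤ v.toNat.log2) := by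
      rintro ⟨h, _, _⟩; omega
    have h2 : ¬ (0 < v ∧ Int.land v (v - 1) = 0) := by rintro ⟨h, _⟩; omega
    rw [if_neg h1, if_neg h2]
  · -- v > 0: reduce to Nat
    obtain ⟨n, rfl⟩ : ∃ n : Nat, v = (n : Int) := ⟨v.toNat, by omega⟩
    have hn : 1 ≤ n := by omega
    have htn : ((n : Int)).toNat = n := by omega
    have hsub : ((n : Int)) - 1 = ((n - 1 : Nat) : Int) := by omega
    have hland : Int.land (n : Int) ((n : Int) - 1) = ((n &&& (n - 1) : Nat) : Int) := by
      rw [hsub]; exact land_natCast _ _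
    have hiff := land_pred_eq_zero_iff n hn
    rw [htn]
    by_cases hp : n = 2 ^ n.log2
    · have hz : Int.land (n : Int) ((n : Int) - 1) = 0 := by
        rw [hland]
        have := hiff.mpr hp
        omega
      have hsize : n.size = n.log2 + 1 := by
        conv_lhs => rw [hp]
        exact Nat.size_pow
      rw [if_pos ⟨hv, hp, Nat.zero_le _⟩, if_pos ⟨hv, hz⟩, hsize]
      congr 1
      push_cast
      ring
    · have hz : ¬ Int.land (n : Int) ((n : Int) - 1) = 0 := by
        rw [hland]
        intro h
        exact hp (hiff.mp (by omega))
      rw [if_neg (by rintro ⟨_, h, _⟩; exact hp h), if_neg (by rintro ⟨_, h⟩; exact hz h)]
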